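-- pv_equiv track=rewrite | github.com/yushaoruxue/MultiModal-PathAI | algorithm/signal_loss_handler.py | _count_consecutive_losses
-- ===== SOURCE A (Python) =====
-- from typing import Dict, List, Optional, Any
--
-- def _count_consecutive_losses(states: List[bool]) -> int:
--     """计算连续丢失次数
--
--     Args:
--         states: 状态列表
--
--     Returns:
--         连续丢失次数
--     """
--     if not states:
--         return 0
--
--     count = 0
--     for state in reversed(states):
--         if not state:
--             count += 1
--         else:
--             break
--
--     return count
-- ===== SOURCE B (Python) =====
-- from typing import List
--
-- def _count_consecutive_losses(states: List[bool]) -> int: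
--     count = 0
--     for state in states:
--         if state:
--             count = 0
--         else:
--             count += 1
--     return count
-- ===== Notes on version B (the rewrite author's own statement) =====
-- stated objective: simpler
-- what changed: Replaced the reverse-iterate-and-break loop (with a separate empty-list guard) by a single forward pass that resets the counter on True, whose final value is the trailing False run length.
import Mathlib
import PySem

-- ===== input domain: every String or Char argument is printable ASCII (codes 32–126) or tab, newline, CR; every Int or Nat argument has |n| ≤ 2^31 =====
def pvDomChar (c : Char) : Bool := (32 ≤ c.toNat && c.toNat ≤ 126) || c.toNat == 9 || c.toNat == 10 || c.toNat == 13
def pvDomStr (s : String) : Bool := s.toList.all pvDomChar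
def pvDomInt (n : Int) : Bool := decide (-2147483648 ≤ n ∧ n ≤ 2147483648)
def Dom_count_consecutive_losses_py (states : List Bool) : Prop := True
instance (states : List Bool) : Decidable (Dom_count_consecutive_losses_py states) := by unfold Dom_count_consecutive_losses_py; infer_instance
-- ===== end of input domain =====

-- ===== PORT A =====
-- A: empty guard, then iterate reversed(states), counting Falses until the first True (break).
def pvLoopA : List Bool → Int → Int
  | [], count => count
  | s :: rest, count => if !s then pvLoopA rest (count + 1) else count

def count_consecutive_losses_py (states : List Bool) : Int :=
  if states = [] then 0 else pvLoopA states.reverse 0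

-- ===== PORT B =====
-- B: single forward pass, counter resets to 0 on True.
def count_consecutive_losses_py_alt (states : List Bool) : Int :=
  states.foldl (fun count s => if s then 0 else count + 1) 0

-- ===== PRECONDITION & SPEC =====
def Spec_count_consecutive_losses_py (states : List Bool) (out : Int) : Prop := out = count_consecutive_losses_py_alt states
instance (states : List Bool) (out : Int) : Decidable (Spec_count_consecutive_losses_py states out) := by unfold Spec_count_consecutive_losses_py; infer_instance

-- ===== CLAIM (what is proved, stated in full; the proofs are below) =====
def Claim_equal_count_consecutive_losses_py : Prop := ∀ (states : List Bool), Dom_count_consecutive_losses_py states → Spec_count_consecutive_losses_py states (count_consecutive_losses_py states)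

-- ===== LEMMAS AND PROOFS =====

-- ===== VERDICT (by name: the statement is the Claim_ definition above) =====
-- leading-False-run length, the common characterisation
def pvLead : List Bool → Int
  | [] => 0
  | s :: rest => if s then 0 else 1 + pvLead rest

theorem pvLoopA_eq (ys : List Bool) : ∀ c : Int, pvLoopA ys c = c + pvLead ys := by
  induction ys with
  | nil => intro c; simp [pvLoopA, pvLead]
  | cons s rest ih =>
    intro c
    cases s <;> simp [pvLoopA, pvLead, ih] <;> ring

theorem pvFoldB_eq (xs : List Bool) :
    xs.foldl (fun count s => if s then 0 else count + 1) 0 = pvLead xs.reverse := by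
  induction xs using List.reverseRecOn with
  | nil => simp [pvLead]
  | append_singleton xs x ih =>
    cases x <;> simp [List.foldl_append, ih, pvLead] <;> ring

theorem count_consecutive_losses_py_spec : Claim_equal_count_consecutive_losses_py := by
  intro states _
  unfold Spec_count_consecutive_losses_py count_consecutive_losses_py count_consecutive_losses_py_alt
  split
  · subst_vars; simp
  · rw [pvFoldB_eq, pvLoopA_eq]; ring
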